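-- pv_equiv track=rewrite | github.com/Supriti2206/FINANCE-ANALYTICS-PROJECT-BY-JPMorgan | FICO_scores_to_categorical_data.py | starts_to_boundaries
-- ===== SOURCE A (Python) =====
-- from typing import List, Tuple
--
-- def starts_to_boundaries(starts: List[int], scores: List[int]) -> List[Tuple[int, int]]:
--     m = len(scores)
--     r = len(starts)
--     bounds = []
--     for i in range(r):
--         lo_idx = starts[i]
--         hi_idx = (starts[i + 1] - 1) if i + 1 < r else m - 1
--         bounds.append((scores[lo_idx], scores[hi_idx]))
--     return bounds
-- ===== SOURCE B (Python) =====
-- from typing import List, Tuple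
--
-- def starts_to_boundaries(starts: List[int], scores: List[int]) -> List[Tuple[int, int]]:
--     # Walk the starts back-to-front carrying the current segment's high boundary
--     # index: the last segment ends at len(scores)-1, and each earlier segment
--     # ends one position before the start of the segment after it.
--     hi = len(scores) - 1
--     out = []
--     for s in reversed(starts):
--         out.append((scores[s], scores[hi]))
--         hi = s - 1
--     out.reverse()
--     return out
-- ===== Notes on version B (the rewrite author's own statement) =====
-- stated objective: alternative
-- what changed: Instead of A's forward index loop with a per-iteration i+1<r lookahead into starts, B makes a single backward pass over starts carrying the current segment's high-boundary index as an accumulator (seeded with len(scores)-1, updated to s-1), then reverses the built list.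
import Mathlib
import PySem

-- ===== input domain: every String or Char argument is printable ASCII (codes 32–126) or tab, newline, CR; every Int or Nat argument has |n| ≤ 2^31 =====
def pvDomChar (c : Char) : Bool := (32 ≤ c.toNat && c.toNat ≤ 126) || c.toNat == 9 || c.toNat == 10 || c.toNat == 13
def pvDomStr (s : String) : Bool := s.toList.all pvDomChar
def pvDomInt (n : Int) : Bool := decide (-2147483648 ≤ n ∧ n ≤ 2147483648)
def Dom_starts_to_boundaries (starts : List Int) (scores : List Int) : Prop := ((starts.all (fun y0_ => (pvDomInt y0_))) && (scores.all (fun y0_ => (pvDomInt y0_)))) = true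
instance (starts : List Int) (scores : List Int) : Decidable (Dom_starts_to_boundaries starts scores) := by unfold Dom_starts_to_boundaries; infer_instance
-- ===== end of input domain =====

-- B replaces A's forward index loop with i+1<r lookahead by a single backward pass over starts
-- carrying the current segment's high-boundary index as an accumulator: an alternative decomposition.

-- ===== PORT A =====
def starts_to_boundaries (starts : List Int) (scores : List Int) : List (Int × Int) :=
  let m : Int := scores.length
  let r : Int := starts.length
  (PySem.List.pyRange 0 r 1).foldl
    (fun bounds i =>
      let loIdx : Int := PySem.List.pyGetD starts i 0
      let hiIdx : Int := if i + 1 < r then PySem.List.pyGetD starts (i + 1) 0 - 1 else m - 1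
      bounds ++ [(PySem.List.pyGetD scores loIdx 0, PySem.List.pyGetD scores hiIdx 0)])
    []

-- ===== PORT B =====
def starts_to_boundaries_alt (starts : List Int) (scores : List Int) : List (Int × Int) :=
  let init : List (Int × Int) × Int := ([], (scores.length : Int) - 1)
  let res := starts.reverse.foldl
    (fun (p : List (Int × Int) × Int) s =>
      (p.1 ++ [(PySem.List.pyGetD scores s 0, PySem.List.pyGetD scores p.2 0)], s - 1))
    init
  res.1.reverse

-- ===== PRECONDITION & SPEC =====
-- Pre_ excludes exactly the inputs on which the Python A raises IndexError
-- (a start index, a shifted start index, or the trailing m-1 out of range of scores).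
def Pre_starts_to_boundaries (starts : List Int) (scores : List Int) : Prop :=
  starts = [] ∨
    (scores ≠ [] ∧ (∀ s ∈ starts, PySem.Raise.InRange scores.length s) ∧
      (∀ s ∈ starts.tail, PySem.Raise.InRange scores.length (s - 1)))
instance (starts : List Int) (scores : List Int) : Decidable (Pre_starts_to_boundaries starts scores) := by unfold Pre_starts_to_boundaries; infer_instance

def pvWitness_starts_to_boundaries : List Int × List Int := ([0, 2, 4], [300, 350, 400, 450, 500, 550])

def Spec_starts_to_boundaries (starts : List Int) (scores : List Int) (out : List (Int × Int)) : Prop := out = starts_to_boundaries_alt starts scores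
instance (starts : List Int) (scores : List Int) (out : List (Int × Int)) : Decidable (Spec_starts_to_boundaries starts scores out) := by unfold Spec_starts_to_boundaries; infer_instance

-- ===== CLAIM (what is proved, stated in full; the proofs are below) =====
def Claim_equal_starts_to_boundaries : Prop := ∀ (starts : List Int) (scores : List Int), Dom_starts_to_boundaries starts scores → Pre_starts_to_boundaries starts scores → Spec_starts_to_boundaries starts scores (starts_to_boundaries starts scores)

-- ===== LEMMAS AND PROOFS =====

-- common middle form: zip each start with its high-boundary index (shifted tail + trailing m-1)
def pvZipForm (starts : List Int) (scores : List Int) : List (Int × Int) :=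
  (starts.zip (starts.tail.map (fun s => s - 1) ++ [(scores.length : Int) - 1])).map
    (fun p => (PySem.List.pyGetD scores p.1 0, PySem.List.pyGetD scores p.2 0))

def pvHeadHi (starts : List Int) (scores : List Int) : Int :=
  match starts with
  | [] => (scores.length : Int) - 1
  | s :: _ => s - 1

theorem a_eq_zip (starts scores : List Int) :
    starts_to_boundaries starts scores = pvZipForm starts scores := by
  unfold starts_to_boundaries pvZipForm
  simp only [PySem.List.foldl_append_singleton_eq_map, List.nil_append]
  apply List.ext_getElem
  · simp [PySem.List.length_pyRange_one, List.length_tail]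
    omega
  · intro k h1 h2
    simp only [List.getElem_map, PySem.List.getElem_pyRange_one, List.getElem_zip]
    have hk : k < starts.length := by
      simpa [PySem.List.length_pyRange_one] using h1
    have hfst : PySem.List.pyGetD starts ((0 : Int) + (k : Int)) 0 = starts[k] := by
      rw [zero_add, PySem.List.pyGetD_natCast, List.getD_eq_getElem _ _ hk]
    rw [hfst]
    congr 1
    by_cases hlast : k + 1 < starts.length
    · have hcond : (0 : Int) + (k : Int) + 1 < (starts.length : Int) := by
        omega
      rw [if_pos hcond]
      have htail : k < starts.tail.length := by simp [List.length_tail]; omega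
      have hlen1 : k < (starts.tail.map (fun s => s - 1) ++ [((scores.length : Int)) - 1]).length := by
        simp [List.length_tail]; omega
      have hend : (starts.tail.map (fun s => s - 1) ++ [((scores.length : Int)) - 1])[k]'hlen1 =
          starts[k + 1] - 1 := by
        rw [List.getElem_append_left (by simpa using htail)]
        simp [List.getElem_tail]
      rw [hend]
      congr 1
      rw [zero_add, show (k : Int) + 1 = ((k + 1 : Nat) : Int) by push_cast; ring,
        PySem.List.pyGetD_natCast, List.getD_eq_getElem _ _ hlast]
    · have hcond : ¬ ((0 : Int) + (k : Int) + 1 < (starts.length : Int)) := by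
        omega
      rw [if_neg hcond]
      have hkeq : k = starts.tail.length := by simp [List.length_tail]; omega
      have hlen2 : k < (starts.tail.map (fun s => s - 1) ++ [((scores.length : Int)) - 1]).length := by
        simp [List.length_tail]; omega
      have hend : (starts.tail.map (fun s => s - 1) ++ [((scores.length : Int)) - 1])[k]'hlen2 =
          (scores.length : Int) - 1 := by
        rw [List.getElem_append_right (by simp [List.length_tail]; omega)]
        simp [hkeq]
      rw [hend]

theorem b_fold (starts scores : List Int) :
    starts.foldr
      (fun s (p : List (Int × Int) × Int) =>
        (p.1 ++ [(PySem.List.pyGetD scores s 0, PySem.List.pyGetD scores p.2 0)], s - 1))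
      ([], (scores.length : Int) - 1)
    = ((pvZipForm starts scores).reverse, pvHeadHi starts scores) := by
  induction starts with
  | nil => simp [pvZipForm, pvHeadHi]
  | cons s rest ih =>
    simp only [List.foldr_cons, ih]
    cases rest with
    | nil => simp [pvZipForm, pvHeadHi]
    | cons t r2 => simp [pvZipForm, pvHeadHi]

theorem ports_eq (starts scores : List Int) :
    starts_to_boundaries starts scores = starts_to_boundaries_alt starts scores := by
  rw [a_eq_zip]
  simp only [starts_to_boundaries_alt, List.foldl_reverse, b_fold, List.reverse_reverse]

-- ===== VERDICT (by name: the statement is the Claim_ definition above) =====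
theorem starts_to_boundaries_spec : Claim_equal_starts_to_boundaries := by
  intro starts scores _ _
  unfold Spec_starts_to_boundaries
  exact ports_eq starts scores
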